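-- pv_equiv track=rewrite | github.com/mtotho/spindrel | app/services/server_log_sources.py | _core_compose_names
-- ===== SOURCE A (Python) =====
-- from typing import Iterable
--
-- _CORE_SERVICE_NAMES: tuple[str, ...] = (
--     "agent-server",
--     "postgres",
-- )
--
-- def _core_compose_names(running: Iterable[str]) -> list[str]:
--     """Map the core compose service names (`agent-server`, `postgres`) to the
--     actual container names docker chose (`agent-server-postgres-1`, etc.).
--
--     Compose containers are typically named ``<project>-<service>-<n>``. We
--     accept any running name whose service component matches a core name.
--     """
--     matches: list[str] = []
--     running_set = list(running)
--     for service in _CORE_SERVICE_NAMES: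
--         # Exact match first
--         if service in running_set:
--             matches.append(service)
--             continue
--         # Then compose-style suffix match: ends with ``-<service>-<n>``
--         for name in running_set:
--             parts = name.split("-")
--             if len(parts) >= 2 and parts[-2] == service:
--                 matches.append(name)
--                 break
--     return matches
-- ===== SOURCE B (Python) =====
-- from typing import Iterable
--
-- _CORE_SERVICE_NAMES: tuple[str, ...] = (
--     "agent-server",
--     "postgres",
-- )
--
-- def _core_compose_names(running: Iterable[str]) -> list[str]:
--     # Single pass over the running names, keeping per core service the best
--     # candidate seen so far: rank 0 = exact name match (always wins), rank 1 =
--     # compose-style suffix match (first occurrence wins, never upgraded by a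
--     # later suffix match).
--     best: dict[str, tuple[int, str]] = {}
--     for name in running:
--         cur = best.get(name)
--         if name in _CORE_SERVICE_NAMES and (cur is None or cur[0] > 0):
--             best[name] = (0, name)
--         parts = name.split("-")
--         if len(parts) >= 2:
--             svc = parts[-2]
--             if svc in _CORE_SERVICE_NAMES and svc not in best:
--                 best[svc] = (1, name)
--     return [best[s][1] for s in _CORE_SERVICE_NAMES if s in best]
-- ===== Notes on version B (the rewrite author's own statement) =====
-- stated objective: alternative
-- what changed: B replaces A's per-service rescans of the running list by a single pass that keeps a ranked best candidate per core service (rank 0 = exact name match, rank 1 = first compose-suffix match), then emits the table in core-name order; it trades the staged scans for one accumulator pass.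
import Mathlib
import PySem

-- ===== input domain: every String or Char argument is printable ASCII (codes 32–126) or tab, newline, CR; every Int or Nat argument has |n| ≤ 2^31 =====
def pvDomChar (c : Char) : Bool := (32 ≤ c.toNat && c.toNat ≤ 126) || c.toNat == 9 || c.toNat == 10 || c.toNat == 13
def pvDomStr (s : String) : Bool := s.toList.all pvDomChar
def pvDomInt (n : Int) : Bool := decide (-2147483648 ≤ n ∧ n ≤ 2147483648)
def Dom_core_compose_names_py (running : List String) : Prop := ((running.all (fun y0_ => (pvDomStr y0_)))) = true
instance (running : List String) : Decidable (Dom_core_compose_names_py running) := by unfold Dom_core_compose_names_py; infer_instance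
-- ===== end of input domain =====

-- B makes ONE pass over the running names keeping a ranked best candidate per core
-- service (rank 0 = exact match, rank 1 = first suffix match) instead of A's per-service rescans.

-- name.split("-"): exact via PySem.Str.split? (separator "-" non-empty, so always `some`)
def pvSplitDash (name : String) : List String := (PySem.Str.split? name "-").getD []

-- the module constant _CORE_SERVICE_NAMES
def pvCoreServiceNames : List String := ["agent-server", "postgres"]

-- ===== PORT A =====
-- A's inner 'for name in running_set: … break' loop: first name matching the compose-style condition
def pvASuffixFind (running_set : List String) (service : String) : Option String :=
  running_set.find? (fun name =>
    let parts := pvSplitDash name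
    decide (2 ≤ parts.length) && (PySem.List.pyGet? parts (-2) == some service))

def core_compose_names_py (running : List String) : List String :=
  let running_set := running
  pvCoreServiceNames.foldl (fun acc service =>
    if running_set.contains service then acc ++ [service]
    else
      match pvASuffixFind running_set service with
      | some name => acc ++ [name]
      | none => acc) []

-- ===== PORT B =====
-- first half of B's loop body: 'if name in _CORE_SERVICE_NAMES and (cur is None or cur[0] > 0): best[name] = (0, name)'
def pvBExact (best : PySem.Dict String (Int × String)) (name : String) : PySem.Dict String (Int × String) :=
  if pvCoreServiceNames.contains name &&
      (match best.get? name with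
       | none => true
       | some cur => decide (0 < cur.1)) then
    best.insert name (0, name)
  else best

-- second half: 'if len(parts) >= 2 and (svc := parts[-2]) in _CORE_SERVICE_NAMES and svc not in best: best[svc] = (1, name)'
def pvBSuffix (best : PySem.Dict String (Int × String)) (name : String) : PySem.Dict String (Int × String) :=
  let parts := pvSplitDash name
  if 2 ≤ parts.length then
    match PySem.List.pyGet? parts (-2) with
    | some svc =>
        if pvCoreServiceNames.contains svc && !best.contains svc then
          best.insert svc (1, name)
        else best
    | none => best
  else best

def pvBStep (best : PySem.Dict String (Int × String)) (name : String) : PySem.Dict String (Int × String) :=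
  pvBSuffix (pvBExact best name) name

def core_compose_names_py_alt (running : List String) : List String :=
  let best := running.foldl pvBStep PySem.Dict.empty
  pvCoreServiceNames.filterMap (fun s => (best.get? s).map (·.2))

-- ===== PRECONDITION & SPEC =====
def Spec_core_compose_names_py (running : List String) (out : List String) : Prop := out = core_compose_names_py_alt running
instance (running : List String) (out : List String) : Decidable (Spec_core_compose_names_py running out) := by unfold Spec_core_compose_names_py; infer_instance

-- ===== CLAIM (what is proved, stated in full; the proofs are below) =====
def Claim_equal_core_compose_names_py : Prop := ∀ (running : List String), Dom_core_compose_names_py running → Spec_core_compose_names_py running (core_compose_names_py running)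

-- ===== LEMMAS AND PROOFS =====

theorem pvBExact_get?_ne (d : PySem.Dict String (Int × String)) (n s : String) (hn : s ≠ n) :
    (pvBExact d n).get? s = d.get? s := by
  unfold pvBExact
  split <;> split <;> first
    | exact PySem.Dict.get?_insert_of_ne _ _ hn
    | rfl

theorem pvBSuffix_get?_nomatch (d : PySem.Dict String (Int × String)) (n s : String)
    (h : ¬ (2 ≤ (pvSplitDash n).length ∧ PySem.List.pyGet? (pvSplitDash n) (-2) = some s)) :
    (pvBSuffix d n).get? s = d.get? s := by
  by_cases hlen : 2 ≤ (pvSplitDash n).length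
  · cases hsvc : PySem.List.pyGet? (pvSplitDash n) (-2) with
    | none => simp [pvBSuffix, hlen, hsvc]
    | some svc =>
        have hne : s ≠ svc := by
          intro he; exact h ⟨hlen, by rw [hsvc, he]⟩
        simp only [pvBSuffix, hlen, hsvc, if_true]
        split
        · exact PySem.Dict.get?_insert_of_ne _ _ hne
        · rfl
  · simp [pvBSuffix, hlen]

theorem pvBSuffix_get?_match (d : PySem.Dict String (Int × String)) (n s : String)
    (hs : s ∈ pvCoreServiceNames)
    (hlen : 2 ≤ (pvSplitDash n).length)
    (hm : PySem.List.pyGet? (pvSplitDash n) (-2) = some s) :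
    (pvBSuffix d n).get? s =
      match d.get? s with
      | none => some ((1 : Int), n)
      | some c => some c := by
  simp only [pvBSuffix, hlen, if_true, hm]
  have hc : pvCoreServiceNames.contains s = true := by
    simpa [List.contains_iff_mem] using hs
  cases hd : d.get? s with
  | none =>
      have hcon : d.contains s = false := by
        rw [PySem.Dict.contains_eq_isSome_get?, hd]; rfl
      simp only [hc, hcon, Bool.not_false, Bool.and_true, if_true]
      exact PySem.Dict.get?_insert_self _ _ _
  | some c =>
      have hcon : d.contains s = true := by
        rw [PySem.Dict.contains_eq_isSome_get?, hd]; rfl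
      simp only [hc, hcon, Bool.not_true, Bool.and_false]
      exact hd

theorem pvBExact_get?_self (d : PySem.Dict String (Int × String)) (s : String)
    (hs : s ∈ pvCoreServiceNames) :
    (pvBExact d s).get? s =
      match d.get? s with
      | none => some ((0 : Int), s)
      | some c => if 0 < c.1 then some ((0 : Int), s) else some c := by
  unfold pvBExact
  have hc : pvCoreServiceNames.contains s = true := by
    simpa [List.contains_iff_mem] using hs
  cases hd : d.get? s with
  | none =>
      simp only [hc, Bool.true_and, if_true]
      exact PySem.Dict.get?_insert_self _ _ _
  | some c =>
      by_cases hr : (0 : Int) < c.1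
      · simp only [hc, hr, decide_true, Bool.true_and, if_true]
        rw [PySem.Dict.get?_insert_self]
      · simp only [hc, hr, decide_false, Bool.true_and, if_false]
        simp [hd]

-- characterization of B's table at a core service key s (such an s is never its own
-- suffix match, hypothesis hss): exact match wins, otherwise the first suffix match
-- found by A's inner scan
theorem pvBStep_foldl_get? (s : String) (hs : s ∈ pvCoreServiceNames)
    (hss : PySem.List.pyGet? (pvSplitDash s) (-2) ≠ some s) :
    ∀ (l : List String) (d : PySem.Dict String (Int × String)),
      (l.foldl pvBStep d).get? s =
        match d.get? s with
        | some c => if 0 < c.1 ∧ s ∈ l then some ((0 : Int), s) else some c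
        | none =>
            if s ∈ l then some ((0 : Int), s)
            else (pvASuffixFind l s).map (fun n => ((1 : Int), n)) := by
  intro l
  induction l with
  | nil =>
      intro d
      cases h : d.get? s <;> simp [pvASuffixFind, h]
  | cons n rest ih =>
      intro d
      rw [List.foldl_cons, ih]
      have hfind : pvASuffixFind (n :: rest) s =
          (if (decide (2 ≤ (pvSplitDash n).length) &&
               (PySem.List.pyGet? (pvSplitDash n) (-2) == some s)) then some n
           else pvASuffixFind rest s) := by
        simp only [pvASuffixFind, List.find?]
        split <;> simp_all
      by_cases hn : n = s
      · -- exact-match name; the suffix half cannot touch key s (hss)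
        subst hn
        have h1 := pvBExact_get?_self d n hs
        have h2 := pvBSuffix_get?_nomatch (pvBExact d n) n n
          (fun h => hss h.2)
        unfold pvBStep
        rw [h2, h1, hfind]
        have hb : (PySem.List.pyGet? (pvSplitDash n) (-2) == some n) = false := by
          simpa using hss
        cases hd : d.get? n with
        | none => simp
        | some c =>
            by_cases hr : (0 : Int) < c.1 <;> simp [hr]
      · -- n ≠ s : the exact half never touches key s
        have h1 := pvBExact_get?_ne d n s (fun h => hn h.symm)
        unfold pvBStep
        by_cases hmatch : 2 ≤ (pvSplitDash n).length ∧ PySem.List.pyGet? (pvSplitDash n) (-2) = some s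
        · have h2 := pvBSuffix_get?_match (pvBExact d n) n s hs hmatch.1 hmatch.2
          rw [h2, h1, hfind]
          have hb : (decide (2 ≤ (pvSplitDash n).length) &&
              (PySem.List.pyGet? (pvSplitDash n) (-2) == some s)) = true := by
            simp [hmatch.1, hmatch.2]
          cases hd : d.get? s with
          | none =>
              simp only [hb, if_true]
              by_cases hmem : s ∈ rest
              · simp [hmem, Ne.symm hn]
              · simp [hmem, Ne.symm hn]
          | some c =>
              by_cases hr : (0 : Int) < c.1 <;> simp [hr, Ne.symm hn]
        · have h2 := pvBSuffix_get?_nomatch (pvBExact d n) n s hmatch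
          rw [h2, h1, hfind]
          have hb : (decide (2 ≤ (pvSplitDash n).length) &&
              (PySem.List.pyGet? (pvSplitDash n) (-2) == some s)) = false := by
            rcases Decidable.em (2 ≤ (pvSplitDash n).length) with h | h
            · have : PySem.List.pyGet? (pvSplitDash n) (-2) ≠ some s := fun he => hmatch ⟨h, he⟩
              simp [this]
            · simp [h]
          cases hd : d.get? s with
          | none => simp [hb, Ne.symm hn]
          | some c =>
              by_cases hr : (0 : Int) < c.1 <;> simp [hr, Ne.symm hn]

-- instantiate the characterization at an empty initial table
theorem pvB_table_get? (s : String) (hs : s ∈ pvCoreServiceNames)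
    (hss : PySem.List.pyGet? (pvSplitDash s) (-2) ≠ some s) (running : List String) :
    (running.foldl pvBStep PySem.Dict.empty).get? s =
      if s ∈ running then some ((0 : Int), s)
      else (pvASuffixFind running s).map (fun n => ((1 : Int), n)) := by
  rw [pvBStep_foldl_get? s hs hss running PySem.Dict.empty]
  simp

-- ===== VERDICT (by name: the statement is the Claim_ definition above) =====
theorem core_compose_names_py_spec : Claim_equal_core_compose_names_py := by
  intro running _
  unfold Spec_core_compose_names_py core_compose_names_py core_compose_names_py_alt
  have h1 := pvB_table_get? "agent-server" (by decide) (by decide) running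
  have h2 := pvB_table_get? "postgres" (by decide) (by decide) running
  simp only [pvCoreServiceNames, List.foldl_cons, List.foldl_nil, List.filterMap, h1, h2]
  by_cases m1 : "agent-server" ∈ running <;> by_cases m2 : "postgres" ∈ running <;>
    cases hf1 : pvASuffixFind running "agent-server" <;>
    cases hf2 : pvASuffixFind running "postgres" <;>
    simp [m1, m2]
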